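-- pv_equiv track=rewrite | github.com/jlundgrenedge/baseball | batted_ball/database/team_mappings.py | get_teams_by_division
-- ===== SOURCE A (Python) =====
-- from typing import Dict, List, Optional
--
-- TEAM_DIVISIONS: Dict[str, tuple] = {
--     # American League East
--     'BAL': ('AL', 'East'),
--     'BOS': ('AL', 'East'),
--     'NYY': ('AL', 'East'),
--     'TB':  ('AL', 'East'),
--     'TOR': ('AL', 'East'),
--
--     # American League Central
--     'CHW': ('AL', 'Central'),
--     'CLE': ('AL', 'Central'),
--     'DET': ('AL', 'Central'),
--     'KC':  ('AL', 'Central'),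
--     'MIN': ('AL', 'Central'),
--
--     # American League West
--     'HOU': ('AL', 'West'),
--     'LAA': ('AL', 'West'),
--     'OAK': ('AL', 'West'),
--     'SEA': ('AL', 'West'),
--     'TEX': ('AL', 'West'),
--
--     # National League East
--     'ATL': ('NL', 'East'),
--     'MIA': ('NL', 'East'),
--     'NYM': ('NL', 'East'),
--     'PHI': ('NL', 'East'),
--     'WSH': ('NL', 'East'),
--
--     # National League Central
--     'CHC': ('NL', 'Central'),
--     'CIN': ('NL', 'Central'),
--     'MIL': ('NL', 'Central'),
--     'PIT': ('NL', 'Central'),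
--     'STL': ('NL', 'Central'),
--
--     # National League West
--     'ARI': ('NL', 'West'),
--     'COL': ('NL', 'West'),
--     'LAD': ('NL', 'West'),
--     'SD':  ('NL', 'West'),
--     'SF':  ('NL', 'West'),
-- }
--
-- def get_teams_by_division(league: str = None, division: str = None) -> List[str]:
--     """
--     Get teams filtered by league and/or division.
--
--     Parameters
--     ----------
--     league : str, optional
--         'AL' or 'NL'
--     division : str, optional
--         'East', 'Central', or 'West'
--
--     Returns
--     -------
--     List[str]
--         List of team abbreviations matching the criteria
--     """
--     teams = []
--     for abbr, (lg, div) in TEAM_DIVISIONS.items():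
--         if league and lg != league:
--             continue
--         if division and div != division:
--             continue
--         teams.append(abbr)
--     return sorted(teams)
-- ===== SOURCE B (Python) =====
-- from typing import Dict, List, Optional, Tuple
--
-- # Grouped index: each (league, division) maps to its sorted list of team abbreviations.
-- DIVISION_TEAMS: Dict[Tuple[str, str], List[str]] = {
--     ('AL', 'East'):    ['BAL', 'BOS', 'NYY', 'TB', 'TOR'],
--     ('AL', 'Central'): ['CHW', 'CLE', 'DET', 'KC', 'MIN'],
--     ('AL', 'West'):    ['HOU', 'LAA', 'OAK', 'SEA', 'TEX'],
--     ('NL', 'East'):    ['ATL', 'MIA', 'NYM', 'PHI', 'WSH'],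
--     ('NL', 'Central'): ['CHC', 'CIN', 'MIL', 'PIT', 'STL'],
--     ('NL', 'West'):    ['ARI', 'COL', 'LAD', 'SD', 'SF'],
-- }
--
--
-- def get_teams_by_division(league: str = None, division: str = None) -> List[str]:
--     return sorted(
--         t
--         for (lg, dv), ts in DIVISION_TEAMS.items()
--         if (not league or lg == league) and (not division or dv == division)
--         for t in ts
--     )
-- ===== Notes on version B (the rewrite author's own statement) =====
-- stated objective: alternative
-- what changed: B keeps the data as a grouped index mapping each (league, division) to its sorted team list and answers each call with one comprehension over the 6 groups, instead of A's per-team scan of the 30-entry table with two continue-guards followed by a sort.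
import Mathlib
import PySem

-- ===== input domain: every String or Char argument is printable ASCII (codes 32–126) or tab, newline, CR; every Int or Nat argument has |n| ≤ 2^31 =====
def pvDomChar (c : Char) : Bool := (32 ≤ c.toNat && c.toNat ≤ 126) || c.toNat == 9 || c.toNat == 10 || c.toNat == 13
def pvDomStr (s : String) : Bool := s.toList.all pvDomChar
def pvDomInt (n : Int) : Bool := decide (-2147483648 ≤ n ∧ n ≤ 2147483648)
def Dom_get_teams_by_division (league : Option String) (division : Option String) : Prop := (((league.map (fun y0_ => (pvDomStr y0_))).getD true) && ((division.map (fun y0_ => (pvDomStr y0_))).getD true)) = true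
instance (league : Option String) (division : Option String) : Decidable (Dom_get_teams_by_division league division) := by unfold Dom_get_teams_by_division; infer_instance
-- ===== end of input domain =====

-- B keeps the data as a grouped index mapping each (league, division) to its sorted
-- team list and answers each call with one pass over the 6 groups, instead of A's
-- per-team scan of the 30-entry table with two continue-guards (objective: alternative).

-- Python truthiness of an optional string: None and '' are falsy.
def strTruthy : Option String → Bool
  | none => false
  | some s => s != ""

-- ===== PORT A =====
-- TEAM_DIVISIONS in insertion order: (abbr, (league, division))
def teamDivisionsA : List (String × String × String) :=
  [("BAL", "AL", "East"), ("BOS", "AL", "East"), ("NYY", "AL", "East"),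
   ("TB", "AL", "East"), ("TOR", "AL", "East"),
   ("CHW", "AL", "Central"), ("CLE", "AL", "Central"), ("DET", "AL", "Central"),
   ("KC", "AL", "Central"), ("MIN", "AL", "Central"),
   ("HOU", "AL", "West"), ("LAA", "AL", "West"), ("OAK", "AL", "West"),
   ("SEA", "AL", "West"), ("TEX", "AL", "West"),
   ("ATL", "NL", "East"), ("MIA", "NL", "East"), ("NYM", "NL", "East"),
   ("PHI", "NL", "East"), ("WSH", "NL", "East"),
   ("CHC", "NL", "Central"), ("CIN", "NL", "Central"), ("MIL", "NL", "Central"),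
   ("PIT", "NL", "Central"), ("STL", "NL", "Central"),
   ("ARI", "NL", "West"), ("COL", "NL", "West"), ("LAD", "NL", "West"),
   ("SD", "NL", "West"), ("SF", "NL", "West")]

def get_teams_by_division (league : Option String) (division : Option String) : List String :=
  PySem.List.sorted
    (teamDivisionsA.foldl (fun teams p =>
      if strTruthy league && (some p.2.1 != league) then teams
      else if strTruthy division && (some p.2.2 != division) then teams
      else teams ++ [p.1]) [])
    (fun x => x) false

-- ===== PORT B =====
-- DIVISION_TEAMS: the grouped index, exactly as Source B declares it.
def divisionTeams : List ((String × String) × List String) :=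
  [(("AL", "East"),    ["BAL", "BOS", "NYY", "TB", "TOR"]),
   (("AL", "Central"), ["CHW", "CLE", "DET", "KC", "MIN"]),
   (("AL", "West"),    ["HOU", "LAA", "OAK", "SEA", "TEX"]),
   (("NL", "East"),    ["ATL", "MIA", "NYM", "PHI", "WSH"]),
   (("NL", "Central"), ["CHC", "CIN", "MIL", "PIT", "STL"]),
   (("NL", "West"),    ["ARI", "COL", "LAD", "SD", "SF"])]

def get_teams_by_division_alt (league : Option String) (division : Option String) : List String :=
  PySem.List.sorted
    ((divisionTeams.filter (fun kv =>
        (!strTruthy league || kv.1.1 == league.getD "") &&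
        (!strTruthy division || kv.1.2 == division.getD ""))).flatMap (·.2))
    (fun x => x) false

-- ===== PRECONDITION & SPEC =====
def Spec_get_teams_by_division (league : Option String) (division : Option String) (out : List String) : Prop := out = get_teams_by_division_alt league division
instance (league : Option String) (division : Option String) (out : List String) : Decidable (Spec_get_teams_by_division league division out) := by unfold Spec_get_teams_by_division; infer_instance

-- ===== CLAIM (what is proved, stated in full; the proofs are below) =====
def Claim_equal_get_teams_by_division : Prop := ∀ (league : Option String) (division : Option String), Dom_get_teams_by_division league division → Spec_get_teams_by_division league division (get_teams_by_division league division)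

-- ===== LEMMAS AND PROOFS =====

-- A on an unrecognized (truthy) league yields [] whatever the division is.
theorem A_badL (s : String) (h1 : s ≠ "") (h2 : s ≠ "AL") (h3 : s ≠ "NL")
    (division : Option String) :
    get_teams_by_division (some s) division = [] := by
  simp [get_teams_by_division, teamDivisionsA, strTruthy, List.foldl,
    h1, Ne.symm h2, Ne.symm h3, PySem.List.sorted_eq_foldl_insertBy]

-- B on an unrecognized (truthy) league yields [] whatever the division is.
theorem B_badL (s : String) (h1 : s ≠ "") (h2 : s ≠ "AL") (h3 : s ≠ "NL")
    (division : Option String) :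
    get_teams_by_division_alt (some s) division = [] := by
  simp [get_teams_by_division_alt, divisionTeams, strTruthy, h1,
    Ne.symm h2, Ne.symm h3, PySem.List.sorted_eq_foldl_insertBy]

-- A on a recognized/absent league but unrecognized (truthy) division yields [].
theorem A_badD (league : Option String)
    (hl : league = none ∨ league = some "" ∨ league = some "AL" ∨ league = some "NL")
    (d : String) (h1 : d ≠ "") (h2 : d ≠ "East") (h3 : d ≠ "Central") (h4 : d ≠ "West") :
    get_teams_by_division league (some d) = [] := by
  rcases hl with h | h | h | h <;> subst h <;>
    simp [get_teams_by_division, teamDivisionsA, strTruthy, List.foldl,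
      h1, Ne.symm h2, Ne.symm h3, Ne.symm h4, PySem.List.sorted_eq_foldl_insertBy]

-- B on a recognized/absent league but unrecognized (truthy) division yields [].
theorem B_badD (league : Option String)
    (hl : league = none ∨ league = some "" ∨ league = some "AL" ∨ league = some "NL")
    (d : String) (h1 : d ≠ "") (h2 : d ≠ "East") (h3 : d ≠ "Central") (h4 : d ≠ "West") :
    get_teams_by_division_alt league (some d) = [] := by
  rcases hl with h | h | h | h <;> subst h <;>
    simp [get_teams_by_division_alt, divisionTeams, strTruthy, h1,
      Ne.symm h2, Ne.symm h3, Ne.symm h4, PySem.List.sorted_eq_foldl_insertBy]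

-- ===== VERDICT (by name: the statement is the Claim_ definition above) =====
theorem get_teams_by_division_spec : Claim_equal_get_teams_by_division := by
  intro league division _
  unfold Spec_get_teams_by_division
  by_cases goodL : league = none ∨ league = some "" ∨ league = some "AL" ∨ league = some "NL"
  · by_cases goodD : division = none ∨ division = some "" ∨ division = some "East" ∨
        division = some "Central" ∨ division = some "West"
    · -- both arguments among the finitely many recognized/absent shapes: evaluate
      rcases goodL with h | h | h | h <;> rcases goodD with hd | hd | hd | hd | hd <;>
        subst h <;> subst hd <;>
        simp [get_teams_by_division, get_teams_by_division_alt, divisionTeams,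
          teamDivisionsA, strTruthy, PySem.List.sorted_eq_foldl_insertBy]
    · -- unrecognized truthy division: both sides are []
      rcases division with _ | d
      · exact absurd (Or.inl rfl) goodD
      · push Not at goodD
        obtain ⟨-, n1, n2, n3, n4⟩ := goodD
        rw [A_badD league goodL d (fun e => n1 (by rw [e])) (fun e => n2 (by rw [e]))
            (fun e => n3 (by rw [e])) (fun e => n4 (by rw [e])),
          B_badD league goodL d (fun e => n1 (by rw [e])) (fun e => n2 (by rw [e]))
            (fun e => n3 (by rw [e])) (fun e => n4 (by rw [e]))]
  · -- unrecognized truthy league: both sides are []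
    rcases league with _ | s
    · exact absurd (Or.inl rfl) goodL
    · push Not at goodL
      obtain ⟨-, n1, n2, n3⟩ := goodL
      rw [A_badL s (fun e => n1 (by rw [e])) (fun e => n2 (by rw [e]))
          (fun e => n3 (by rw [e])) division,
        B_badL s (fun e => n1 (by rw [e])) (fun e => n2 (by rw [e]))
          (fun e => n3 (by rw [e])) division]
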